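-- pv_equiv track=rewrite | github.com/Niccolum/dature | src/dature/source_locators/json_.py | _scan_container_end
-- ===== SOURCE A (Python) =====
-- def _skip_string(content: str, pos: int) -> int:
--     """Advance past a JSON string body. Returns position after the closing quote."""
--     length = len(content)
--     while pos < length:
--         ch = content[pos]
--         if ch == "\\":
--             pos += 2
--             continue
--         if ch == '"':
--             return pos + 1
--         pos += 1
--     return pos
--
-- def _scan_container_end(content: str, pos: int, length: int, current_line: int) -> int:
--     depth = 1
--     pos += 1
--     while pos < length and depth > 0:
--         c = content[pos]
--         if c == "\n":
--             current_line += 1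
--         elif c == '"':
--             pos = _skip_string(content, pos + 1)
--             continue
--         elif c in "{[":
--             depth += 1
--         elif c in "}]":
--             depth -= 1
--         pos += 1
--     return current_line
-- ===== SOURCE B (Python) =====
-- def _scan_container_end(content: str, pos: int, length: int, current_line: int) -> int:
--     depth = 1
--     in_string = False
--     escape = False
--     i = pos + 1
--     while i < length and depth > 0:
--         c = content[i]
--         if in_string:
--             if escape:
--                 escape = False
--             elif c == "\\":
--                 escape = True
--             elif c == '"':
--                 in_string = False
--         elif c == "\n":
--             current_line += 1
--         elif c == '"':
--             in_string = True
--         elif c in "{[":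
--             depth += 1
--         elif c in "}]":
--             depth -= 1
--         i += 1
--     return current_line
-- ===== Notes on version B (the rewrite author's own statement) =====
-- stated objective: simpler
-- what changed: Replaces A's two-loop design (outer scan plus a _skip_string helper re-scanning for the closing quote) with a single linear loop carrying in_string and escape state booleans; no helper function.
-- outside the precondition, e.g. on _scan_container_end('}x', -1, 5, 0): A returns 0, B returns 0
import Mathlib
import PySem

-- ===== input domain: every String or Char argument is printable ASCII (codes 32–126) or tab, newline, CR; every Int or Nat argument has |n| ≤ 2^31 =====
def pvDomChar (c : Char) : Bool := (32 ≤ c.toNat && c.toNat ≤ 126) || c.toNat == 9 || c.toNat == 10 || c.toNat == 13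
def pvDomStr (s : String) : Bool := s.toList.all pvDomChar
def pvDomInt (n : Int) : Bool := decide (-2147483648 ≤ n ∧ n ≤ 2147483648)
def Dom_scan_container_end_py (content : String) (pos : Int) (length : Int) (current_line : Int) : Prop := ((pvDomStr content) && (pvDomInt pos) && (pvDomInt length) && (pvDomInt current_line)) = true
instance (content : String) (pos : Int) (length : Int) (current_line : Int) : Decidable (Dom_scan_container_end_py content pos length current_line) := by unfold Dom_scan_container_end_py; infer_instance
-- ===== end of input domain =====

-- B replaces A's two loops (outer scan + _skip_string helper) with one loop carrying
-- in_string/escape state booleans (objective: simpler); return value only, no mutation.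
-- Both loops advance the index by ≥ 1 per iteration, so each port runs its loop on a
-- Nat fuel equal to the remaining index range (a totality guard only, never exhausted
-- before the Python loop exits).

-- content[i] as read by both Pythons (Python negative-index semantics; inside Pre_
-- every read is in range, so the ' ' default is never observed there)
def pvCat (cs : List Char) (i : Int) : Char := (PySem.List.pyGet? cs i).getD ' '

-- ===== PORT A =====
-- literal port of _skip_string's while-loop (bounded by len(content), as in the Python)
def pvSkipGo (cs : List Char) : Nat → Int → Int
  | 0, pos => pos
  | n + 1, pos =>
    if pos < (cs.length : Int) then
      if pvCat cs pos = '\\' then pvSkipGo cs n (pos + 2)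
      else if pvCat cs pos = '"' then pos + 1
      else pvSkipGo cs n (pos + 1)
    else pos

def pvSkipString (cs : List Char) (pos : Int) : Int :=
  pvSkipGo cs ((cs.length : Int) - pos).toNat pos

-- literal port of A's outer while-loop
def pvScanGo (cs : List Char) (length : Int) : Nat → Int → Int → Int → Int
  | 0, _, _, line => line
  | n + 1, pos, depth, line =>
    if pos < length ∧ 0 < depth then
      if pvCat cs pos = '\n' then pvScanGo cs length n (pos + 1) depth (line + 1)
      else if pvCat cs pos = '"' then pvScanGo cs length n (pvSkipString cs (pos + 1)) depth line
      else if pvCat cs pos = '{' ∨ pvCat cs pos = '[' then pvScanGo cs length n (pos + 1) (depth + 1) line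
      else if pvCat cs pos = '}' ∨ pvCat cs pos = ']' then pvScanGo cs length n (pos + 1) (depth - 1) line
      else pvScanGo cs length n (pos + 1) depth line
    else line

def scan_container_end_py (content : String) (pos : Int) (length : Int) (current_line : Int) : Int :=
  pvScanGo content.toList length ((length - (pos + 1)).toNat) (pos + 1) 1 current_line

-- ===== PORT B =====
-- literal port of B's single state-machine loop (in_string / escape booleans)
def pvAltGo (cs : List Char) (length : Int) : Nat → Int → Int → Int → Bool → Bool → Int
  | 0, _, _, line, _, _ => line
  | n + 1, pos, depth, line, in_string, escape =>
    if pos < length ∧ 0 < depth then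
      if in_string then
        if escape then pvAltGo cs length n (pos + 1) depth line true false
        else if pvCat cs pos = '\\' then pvAltGo cs length n (pos + 1) depth line true true
        else if pvCat cs pos = '"' then pvAltGo cs length n (pos + 1) depth line false false
        else pvAltGo cs length n (pos + 1) depth line true false
      else if pvCat cs pos = '\n' then pvAltGo cs length n (pos + 1) depth (line + 1) false false
      else if pvCat cs pos = '"' then pvAltGo cs length n (pos + 1) depth line true false
      else if pvCat cs pos = '{' ∨ pvCat cs pos = '[' then pvAltGo cs length n (pos + 1) (depth + 1) line false false
      else if pvCat cs pos = '}' ∨ pvCat cs pos = ']' then pvAltGo cs length n (pos + 1) (depth - 1) line false false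
      else pvAltGo cs length n (pos + 1) depth line false false
    else line

def scan_container_end_py_alt (content : String) (pos : Int) (length : Int) (current_line : Int) : Int :=
  pvAltGo content.toList length ((length - (pos + 1)).toNat) (pos + 1) 1 current_line false false

-- ===== PRECONDITION & SPEC =====
-- Pre_ excludes exactly the inputs where Python A raises IndexError (a read at an index
-- outside [-len(content), len(content)) is reachable); it also excludes some inputs with
-- length > len(content) on which A happens to return because depth closes before the
-- string runs out — there A's acceptance of an inconsistent `length` argument is accidental.
def Pre_scan_container_end_py (content : String) (pos : Int) (length : Int) (current_line : Int) : Prop :=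
  length ≤ pos + 1 ∨
    (length ≤ (content.toList.length : Int) ∧ -(content.toList.length : Int) ≤ pos + 1)
instance (content : String) (pos : Int) (length : Int) (current_line : Int) : Decidable (Pre_scan_container_end_py content pos length current_line) := by unfold Pre_scan_container_end_py; infer_instance

def pvWitness_scan_container_end_py : String × Int × Int × Int := ("[a\n\"}\"\n]", 0, 8, 0)

def Spec_scan_container_end_py (content : String) (pos : Int) (length : Int) (current_line : Int) (out : Int) : Prop := out = scan_container_end_py_alt content pos length current_line
instance (content : String) (pos : Int) (length : Int) (current_line : Int) (out : Int) : Decidable (Spec_scan_container_end_py content pos length current_line out) := by unfold Spec_scan_container_end_py; infer_instance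

-- ===== CLAIM (what is proved, stated in full; the proofs are below) =====
def Claim_equal_scan_container_end_py : Prop := ∀ (content : String) (pos : Int) (length : Int) (current_line : Int), Dom_scan_container_end_py content pos length current_line → Pre_scan_container_end_py content pos length current_line → Spec_scan_container_end_py content pos length current_line (scan_container_end_py content pos length current_line)

-- ===== LEMMAS AND PROOFS =====

-- canonical entry points: each loop started with its exact remaining-range fuel
def pvScanFrom (cs : List Char) (length pos depth line : Int) : Int :=
  pvScanGo cs length ((length - pos).toNat) pos depth line
def pvAltFrom (cs : List Char) (length pos depth line : Int) (s e : Bool) : Int :=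
  pvAltGo cs length ((length - pos).toNat) pos depth line s e

lemma pvSkipGo_ge (cs : List Char) : ∀ (n : Nat) (pos : Int), pos ≤ pvSkipGo cs n pos := by
  intro n
  induction n with
  | zero => intro pos; simp [pvSkipGo]
  | succ n ih =>
      intro pos
      simp only [pvSkipGo]
      split_ifs with h1 h2 h3
      · have := ih (pos + 2); omega
      · omega
      · have := ih (pos + 1); omega
      · omega

lemma pvSkipGo_irrel (cs : List Char) :
    ∀ (n m : Nat) (pos : Int), ((cs.length : Int) - pos).toNat ≤ n →
      ((cs.length : Int) - pos).toNat ≤ m → pvSkipGo cs n pos = pvSkipGo cs m pos := by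
  intro n
  induction n with
  | zero =>
      intro m pos h1 _
      cases m with
      | zero => rfl
      | succ m => simp only [pvSkipGo]; rw [if_neg (by omega)]
  | succ n ih =>
      intro m pos h1 h2
      cases m with
      | zero => simp only [pvSkipGo]; rw [if_neg (by omega)]
      | succ m =>
        simp only [pvSkipGo]
        by_cases hp : pos < (cs.length : Int)
        · rw [if_pos hp, if_pos hp]
          split_ifs with hb hq
          · exact ih m (pos + 2) (by omega) (by omega)
          · rfl
          · exact ih m (pos + 1) (by omega) (by omega)
        · rw [if_neg hp, if_neg hp]

lemma pvSkipString_ge (cs : List Char) (pos : Int) : pos ≤ pvSkipString cs pos :=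
  pvSkipGo_ge cs _ pos

lemma pvSkip_step (cs : List Char) (pos : Int) (h : pos < (cs.length : Int)) :
    pvSkipString cs pos =
      if pvCat cs pos = '\\' then pvSkipString cs (pos + 2)
      else if pvCat cs pos = '"' then pos + 1
      else pvSkipString cs (pos + 1) := by
  unfold pvSkipString
  have hk : ((cs.length : Int) - pos).toNat = ((cs.length : Int) - (pos + 1)).toNat + 1 := by omega
  rw [hk]
  simp only [pvSkipGo]
  rw [if_pos h]
  split_ifs with hb hq
  · exact pvSkipGo_irrel cs _ _ (pos + 2) (by omega) (le_refl _)
  · rfl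
  · rfl

lemma pvScanGo_irrel (cs : List Char) (length : Int) :
    ∀ (n m : Nat) (pos depth line : Int), (length - pos).toNat ≤ n →
      (length - pos).toNat ≤ m →
      pvScanGo cs length n pos depth line = pvScanGo cs length m pos depth line := by
  intro n
  induction n with
  | zero =>
      intro m pos depth line h1 _
      cases m with
      | zero => rfl
      | succ m => simp only [pvScanGo]; rw [if_neg (by omega)]
  | succ n ih =>
      intro m pos depth line h1 h2
      cases m with
      | zero => simp only [pvScanGo]; rw [if_neg (by omega)]
      | succ m =>
        simp only [pvScanGo]
        by_cases hp : pos < length ∧ 0 < depth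
        · rw [if_pos hp, if_pos hp]
          split_ifs with c1 c2 c3 c4
          · exact ih m (pos + 1) depth (line + 1) (by omega) (by omega)
          · have := pvSkipString_ge cs (pos + 1)
            exact ih m (pvSkipString cs (pos + 1)) depth line (by omega) (by omega)
          · exact ih m (pos + 1) (depth + 1) line (by omega) (by omega)
          · exact ih m (pos + 1) (depth - 1) line (by omega) (by omega)
          · exact ih m (pos + 1) depth line (by omega) (by omega)
        · rw [if_neg hp, if_neg hp]

lemma pvScan_stop (cs : List Char) (length pos depth line : Int)
    (h : ¬ (pos < length ∧ 0 < depth)) : pvScanFrom cs length pos depth line = line := by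
  unfold pvScanFrom
  cases hk : (length - pos).toNat with
  | zero => rfl
  | succ k => simp only [pvScanGo]; rw [if_neg h]

lemma pvScan_step (cs : List Char) (length pos depth line : Int)
    (h : pos < length ∧ 0 < depth) :
    pvScanFrom cs length pos depth line =
      if pvCat cs pos = '\n' then pvScanFrom cs length (pos + 1) depth (line + 1)
      else if pvCat cs pos = '"' then pvScanFrom cs length (pvSkipString cs (pos + 1)) depth line
      else if pvCat cs pos = '{' ∨ pvCat cs pos = '[' then pvScanFrom cs length (pos + 1) (depth + 1) line
      else if pvCat cs pos = '}' ∨ pvCat cs pos = ']' then pvScanFrom cs length (pos + 1) (depth - 1) line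
      else pvScanFrom cs length (pos + 1) depth line := by
  unfold pvScanFrom
  have hk : (length - pos).toNat = (length - (pos + 1)).toNat + 1 := by omega
  rw [hk]
  simp only [pvScanGo]
  rw [if_pos h]
  split_ifs with c1 c2 c3 c4
  · rfl
  · have := pvSkipString_ge cs (pos + 1)
    exact pvScanGo_irrel cs length _ _ _ depth line (by omega) (le_refl _)
  · rfl
  · rfl
  · rfl

lemma pvAlt_stop (cs : List Char) (length pos depth line : Int) (s e : Bool)
    (h : ¬ (pos < length ∧ 0 < depth)) : pvAltFrom cs length pos depth line s e = line := by
  unfold pvAltFrom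
  cases hk : (length - pos).toNat with
  | zero => rfl
  | succ k => simp only [pvAltGo]; rw [if_neg h]

lemma pvAlt_step (cs : List Char) (length pos depth line : Int) (s e : Bool)
    (h : pos < length ∧ 0 < depth) :
    pvAltFrom cs length pos depth line s e =
      if s then
        if e then pvAltFrom cs length (pos + 1) depth line true false
        else if pvCat cs pos = '\\' then pvAltFrom cs length (pos + 1) depth line true true
        else if pvCat cs pos = '"' then pvAltFrom cs length (pos + 1) depth line false false
        else pvAltFrom cs length (pos + 1) depth line true false
      else if pvCat cs pos = '\n' then pvAltFrom cs length (pos + 1) depth (line + 1) false false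
      else if pvCat cs pos = '"' then pvAltFrom cs length (pos + 1) depth line true false
      else if pvCat cs pos = '{' ∨ pvCat cs pos = '[' then pvAltFrom cs length (pos + 1) (depth + 1) line false false
      else if pvCat cs pos = '}' ∨ pvCat cs pos = ']' then pvAltFrom cs length (pos + 1) (depth - 1) line false false
      else pvAltFrom cs length (pos + 1) depth line false false := by
  unfold pvAltFrom
  have hk : (length - pos).toNat = (length - (pos + 1)).toNat + 1 := by omega
  rw [hk]
  simp only [pvAltGo]
  rw [if_pos h]

-- The simultaneous invariant: outside a string the two loops agree; inside a string
-- (s = true) B's loop computes what A's loop computes after _skip_string, e = true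
-- meaning the skipper still has to jump over the character at the current position.
lemma pvTriple (cs : List Char) (length : Int) (hlen : length ≤ (cs.length : Int)) :
    ∀ n : Nat, ∀ pos depth line : Int, (length - pos).toNat ≤ n →
      (pvScanFrom cs length pos depth line = pvAltFrom cs length pos depth line false false) ∧
      (pvAltFrom cs length pos depth line true false
        = pvScanFrom cs length (pvSkipString cs pos) depth line) ∧
      (pvAltFrom cs length pos depth line true true
        = pvScanFrom cs length (pvSkipString cs (pos + 1)) depth line) := by
  intro n
  induction n with
  | zero =>
      intro pos depth line hle
      have hp : length ≤ pos := by omega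
      have hsk : length ≤ pvSkipString cs pos := le_trans hp (pvSkipString_ge cs pos)
      have hsk1 : length ≤ pvSkipString cs (pos + 1) :=
        le_trans (by omega) (pvSkipString_ge cs (pos + 1))
      refine ⟨?_, ?_, ?_⟩
      · rw [pvScan_stop cs length pos depth line (by omega),
            pvAlt_stop cs length pos depth line false false (by omega)]
      · rw [pvAlt_stop cs length pos depth line true false (by omega),
            pvScan_stop cs length _ depth line (by omega)]
      · rw [pvAlt_stop cs length pos depth line true true (by omega),
            pvScan_stop cs length _ depth line (by omega)]
  | succ n ih =>
      intro pos depth line hle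
      by_cases hp : pos < length
      case neg =>
        have hsk : length ≤ pvSkipString cs pos := le_trans (by omega) (pvSkipString_ge cs pos)
        have hsk1 : length ≤ pvSkipString cs (pos + 1) :=
          le_trans (by omega) (pvSkipString_ge cs (pos + 1))
        refine ⟨?_, ?_, ?_⟩
        · rw [pvScan_stop cs length pos depth line (by omega),
              pvAlt_stop cs length pos depth line false false (by omega)]
        · rw [pvAlt_stop cs length pos depth line true false (by omega),
              pvScan_stop cs length _ depth line (by omega)]
        · rw [pvAlt_stop cs length pos depth line true true (by omega),
              pvScan_stop cs length _ depth line (by omega)]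
      case pos =>
      by_cases hd : 0 < depth
      case neg =>
        refine ⟨?_, ?_, ?_⟩
        · rw [pvScan_stop cs length pos depth line (by omega),
              pvAlt_stop cs length pos depth line false false (by omega)]
        · rw [pvAlt_stop cs length pos depth line true false (by omega),
              pvScan_stop cs length _ depth line (by omega)]
        · rw [pvAlt_stop cs length pos depth line true true (by omega),
              pvScan_stop cs length _ depth line (by omega)]
      case pos =>
      have hcond : pos < length ∧ 0 < depth := ⟨hp, hd⟩
      have hlt : pos < (cs.length : Int) := lt_of_lt_of_le hp hlen
      have hn : (length - (pos + 1)).toNat ≤ n := by omega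
      have ihm := fun d l => (ih (pos + 1) d l hn).1
      have iha1 := fun d l => (ih (pos + 1) d l hn).2.1
      have iha2 := fun d l => (ih (pos + 1) d l hn).2.2
      refine ⟨?_, ?_, ?_⟩
      · -- main: not in a string
        rw [pvScan_step cs length pos depth line hcond, pvAlt_step cs length pos depth line false false hcond]
        simp only [Bool.false_eq_true, if_false]
        split_ifs with h1 h2 h3 h4
        · exact ihm depth (line + 1)
        · exact (iha1 depth line).symm
        · exact ihm (depth + 1) line
        · exact ihm (depth - 1) line
        · exact ihm depth line
      · -- aux1: in a string, no pending escape
        rw [pvAlt_step cs length pos depth line true false hcond, pvSkip_step cs pos hlt]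
        simp only [Bool.false_eq_true, if_true, if_false]
        split_ifs with h1 h2
        · -- backslash: skipper jumps two
          have e2 : pos + 1 + 1 = pos + 2 := by ring
          rw [iha2 depth line, e2]
        · -- closing quote
          exact (ihm depth line).symm
        · -- ordinary character inside the string
          rw [iha1 depth line]
      · -- aux2: in a string, pending escape: ignore the character
        rw [pvAlt_step cs length pos depth line true true hcond]
        simp only [if_true]
        exact iha1 depth line

-- ===== VERDICT (by name: the statement is the Claim_ definition above) =====
theorem scan_container_end_py_spec : Claim_equal_scan_container_end_py := by
  intro content pos length current_line _hdom hpre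
  unfold Spec_scan_container_end_py scan_container_end_py scan_container_end_py_alt
  rcases hpre with h | ⟨hlen, _hneg⟩
  · have h0 : (length - (pos + 1)).toNat = 0 := by omega
    rw [h0]
    rfl
  · exact (pvTriple content.toList length hlen ((length - (pos + 1)).toNat) (pos + 1) 1
      current_line (le_refl _)).1
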